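-- pv_equiv track=rewrite | github.com/HadjSassi/geekshack3 | scode/teamRAM/prob3/main.py | count_delicious_substrings
-- ===== SOURCE A (Python) =====
-- def count_delicious_substrings(s):
--     count = 0
--     s_len = len(s)
--
--     for i in range(s_len):
--         for j in range(i + 1, s_len + 1):
--             substring = s[i:j]
--             if substring.startswith("chak") and substring.endswith("chouka"):
--                 count += 1
--
--     return count
-- ===== SOURCE B (Python) =====
-- def count_delicious_substrings(s):
--     total = 0
--     chak_seen = 0
--     n = len(s)
--     for j in range(n + 1):
--         if j >= 10 and s[j-10:j-6] == "chak":
--             chak_seen += 1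
--         if j >= 6 and s[j-6:j] == "chouka":
--             total += chak_seen
--     return total
-- ===== Notes on version B (the rewrite author's own statement) =====
-- stated objective: faster
-- what changed: Replaced the all-pairs triple loop (every slice checked for the chak prefix and chouka suffix) by a single left-to-right pass that keeps a running count of chak starts at least 10 positions back and adds it whenever a chouka ends (prefix-count pair counting).
import Mathlib
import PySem

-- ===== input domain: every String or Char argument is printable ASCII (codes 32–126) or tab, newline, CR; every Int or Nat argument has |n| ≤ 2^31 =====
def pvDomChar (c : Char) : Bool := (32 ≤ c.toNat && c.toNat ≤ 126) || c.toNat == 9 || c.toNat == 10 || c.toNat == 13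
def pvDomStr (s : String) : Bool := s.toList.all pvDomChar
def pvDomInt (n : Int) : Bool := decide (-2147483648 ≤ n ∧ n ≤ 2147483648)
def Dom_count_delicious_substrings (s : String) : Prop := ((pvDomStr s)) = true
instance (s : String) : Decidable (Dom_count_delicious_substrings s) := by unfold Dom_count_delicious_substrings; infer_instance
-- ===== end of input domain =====

-- B replaces A's all-pairs slice scan by one left-to-right pass with a running count of
-- chak starts at least 10 positions back, added whenever a chouka ends (objective: faster).

-- ===== PORT A =====
def count_delicious_substrings (s : String) : Int :=
  let count : Int := 0
  let s_len : Int := PySem.Str.len s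
  let count := (PySem.List.pyRange 0 s_len 1).foldl (fun count i =>
    (PySem.List.pyRange (i + 1) (s_len + 1) 1).foldl (fun count j =>
      let substring := PySem.Str.slice s (some i) (some j)
      if PySem.Str.startswith substring "chak" && PySem.Str.endswith substring "chouka" then
        count + 1
      else count) count) count
  count

-- ===== PORT B =====
def count_delicious_substrings_alt (s : String) : Int :=
  let n : Int := PySem.Str.len s
  let r := (PySem.List.pyRange 0 (n + 1) 1).foldl (fun (st : Int × Int) j =>
    let chak_seen := if 10 ≤ j ∧ PySem.Str.slice s (some (j - 10)) (some (j - 6)) = "chak" then st.2 + 1 else st.2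
    let total := if 6 ≤ j ∧ PySem.Str.slice s (some (j - 6)) (some j) = "chouka" then st.1 + chak_seen else st.1
    (total, chak_seen)) ((0 : Int), (0 : Int))
  r.1

-- ===== PRECONDITION & SPEC =====
def Spec_count_delicious_substrings (s : String) (out : Int) : Prop := out = count_delicious_substrings_alt s
instance (s : String) (out : Int) : Decidable (Spec_count_delicious_substrings s out) := by unfold Spec_count_delicious_substrings; infer_instance

-- ===== CLAIM (what is proved, stated in full; the proofs are below) =====
def Claim_equal_count_delicious_substrings : Prop := ∀ (s : String), Dom_count_delicious_substrings s → Spec_count_delicious_substrings s (count_delicious_substrings s)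

-- ===== LEMMAS AND PROOFS =====

def chakL : List Char := ['c', 'h', 'a', 'k']
def choukaL : List Char := ['c', 'h', 'o', 'u', 'k', 'a']

-- "chak" occurs in l at position i
abbrev qP (l : List Char) (i : ℕ) : Prop := (l.drop i).take 4 = chakL
-- "chouka" occurs in l ending (exclusively) at position j
abbrev rP (l : List Char) (j : ℕ) : Prop := (l.drop (j - 6)).take 6 = choukaL

-- running count of "chak" starts seen strictly before the processing of step m finished
def Ck (l : List Char) (m : ℕ) : ℤ := ∑ j ∈ Finset.range m, if 10 ≤ j ∧ qP l (j - 10) then 1 else 0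
-- B's total after processing steps 0..m-1
def Tt (l : List Char) (m : ℕ) : ℤ := ∑ j ∈ Finset.range m, if 6 ≤ j ∧ rP l j then Ck l (j + 1) else 0

lemma window_get (l w : List Char) (a t : ℕ) (h : (l.drop a).take w.length = w)
    (ht : t < w.length) : l[a + t]? = w[t]? := by
  have := congrArg (fun u => u[t]?) h
  simpa [List.getElem?_take, List.getElem?_drop, ht] using this

lemma no_overlap (l : List Char) (i j : ℕ) (hq : qP l i) (hr : rP l j)
    (h6 : i + 6 ≤ j) (h9 : j ≤ i + 9) : False := by
  have hq' : ∀ t, t < 4 → l[i + t]? = chakL[t]? := fun t ht => window_get l chakL i t hq ht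
  have hr' : ∀ t, t < 6 → l[(j - 6) + t]? = choukaL[t]? := fun t ht => window_get l choukaL (j - 6) t hr ht
  have hcases : j = i + 6 ∨ j = i + 7 ∨ j = i + 8 ∨ j = i + 9 := by omega
  rcases hcases with h | h | h | h
  · have h1 := hq' 2 (by omega)
    have h2 := hr' 2 (by omega)
    rw [show j - 6 = i by omega] at h2
    rw [h1] at h2; simp [chakL, choukaL] at h2
  · have h1 := hq' 1 (by omega)
    have h2 := hr' 0 (by omega)
    rw [show j - 6 + 0 = i + 1 by omega] at h2
    rw [h1] at h2; simp [chakL, choukaL] at h2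
  · have h1 := hq' 2 (by omega)
    have h2 := hr' 0 (by omega)
    rw [show j - 6 + 0 = i + 2 by omega] at h2
    rw [h1] at h2; simp [chakL, choukaL] at h2
  · have h1 := hq' 3 (by omega)
    have h2 := hr' 0 (by omega)
    rw [show j - 6 + 0 = i + 3 by omega] at h2
    rw [h1] at h2; simp [chakL, choukaL] at h2

-- the substring s[i:j] starts with "chak" and ends with "chouka" iff "chak" is at i,
-- "chouka" ends at j, and they do not overlap (j ≥ i + 10): the kernel combinatorial fact
lemma core (l : List Char) (i j : ℕ) (hij : i < j) (hjn : j ≤ l.length) :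
    (chakL <+: (l.drop i).take (j - i) ∧ choukaL <:+ (l.drop i).take (j - i)) ↔
      (qP l i ∧ rP l j ∧ i + 10 ≤ j) := by
  set sub := (l.drop i).take (j - i) with hsub
  have hlen : sub.length = j - i := by
    simp [hsub, List.length_take, List.length_drop]; omega
  have hdrop : ∀ h6 : i + 6 ≤ j, sub.drop (j - i - 6) = (l.drop (j - 6)).take 6 := by
    intro h6
    rw [hsub, List.drop_take, List.drop_drop,
      show i + (j - i - 6) = j - 6 by omega, show j - i - (j - i - 6) = 6 by omega]
  constructor
  · rintro ⟨hp, hs⟩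
    have hp' : chakL = sub.take 4 := List.prefix_iff_eq_take.mp hp
    have h4 : 4 ≤ j - i := by
      have := congrArg List.length hp'
      simp [List.length_take, hlen, chakL] at this; omega
    have hq : qP l i := by
      have ht4 : sub.take 4 = (l.drop i).take 4 := by
        rw [hsub, List.take_take, show min 4 (j - i) = 4 by omega]
      exact (hp'.trans ht4).symm
    have hs' : choukaL = sub.drop (sub.length - 6) := List.suffix_iff_eq_drop.mp hs
    have h6 : 6 ≤ j - i := by
      have := congrArg List.length hs'
      simp [List.length_drop, hlen, choukaL] at this; omega
    have hr : rP l j := by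
      have h1 : sub.drop (sub.length - 6) = sub.drop (j - i - 6) := by rw [hlen]
      exact ((hs'.trans h1).trans (hdrop (by omega))).symm
    refine ⟨hq, hr, ?_⟩
    by_contra h10
    exact no_overlap l i j hq hr (by omega) (by omega)
  · rintro ⟨hq, hr, h10⟩
    have h10' : 10 ≤ j - i := by omega
    constructor
    · rw [List.prefix_iff_eq_take, show chakL.length = 4 from rfl, hsub,
        List.take_take, show min 4 (j - i) = 4 by omega]
      exact hq.symm
    · rw [List.suffix_iff_eq_drop, show choukaL.length = 6 from rfl, hlen,
        hdrop (by omega)]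
      exact hr.symm

-- ---- closed forms of the two running counts ----

lemma Ck_eq (l : List Char) (m : ℕ) :
    Ck l m = ∑ i ∈ Finset.range (m - 10), if qP l i then (1 : ℤ) else 0 := by
  induction m with
  | zero => simp [Ck]
  | succ m ih =>
    rw [Ck, Finset.sum_range_succ, ← Ck, ih]
    by_cases h10 : 10 ≤ m
    · rw [show m + 1 - 10 = (m - 10) + 1 by omega, Finset.sum_range_succ]
      simp [h10]
    · rw [show m + 1 - 10 = m - 10 by omega]
      simp [h10]

lemma inner_eq (l : List Char) (j : ℕ) (hjn : j ≤ l.length) :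
    (∑ i ∈ Finset.range l.length, if qP l i ∧ rP l j ∧ i + 10 ≤ j then (1 : ℤ) else 0) =
      if 6 ≤ j ∧ rP l j then Ck l (j + 1) else 0 := by
  by_cases hr : rP l j
  · have hss : Finset.range (j + 1 - 10) ⊆ Finset.range l.length := by
      intro x hx; simp only [Finset.mem_range] at *; omega
    have hsum : (∑ i ∈ Finset.range l.length, if qP l i ∧ rP l j ∧ i + 10 ≤ j then (1 : ℤ) else 0)
        = ∑ i ∈ Finset.range (j + 1 - 10), if qP l i then (1 : ℤ) else 0 := by
      rw [← Finset.sum_subset hss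
        (fun x hx hx' => by
          simp only [Finset.mem_range, not_lt] at hx hx'
          simp only [ite_eq_right_iff]
          rintro ⟨-, -, h10⟩
          omega)]
      refine Finset.sum_congr rfl (fun i hi => ?_)
      simp only [Finset.mem_range] at hi
      by_cases hq : qP l i
      · rw [if_pos ⟨hq, hr, by omega⟩, if_pos hq]
      · rw [if_neg (fun hcon => hq hcon.1), if_neg hq]
    rw [hsum, ← Ck_eq]
    by_cases h6 : 6 ≤ j
    · rw [if_pos ⟨h6, hr⟩]
    · have hz : Ck l (j + 1) = 0 := by
        rw [Ck_eq, show j + 1 - 10 = 0 by omega]; simp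
      rw [hz]; simp [h6]
  · simp [hr]

-- ---- A's nested loops as a double sum ----

lemma cond_eq (s : String) (a b : ℕ) (hab : a < b) (hbn : b ≤ s.toList.length) :
    (PySem.Str.startswith (PySem.Str.slice s (some (a : ℤ)) (some (b : ℤ))) "chak" &&
      PySem.Str.endswith (PySem.Str.slice s (some (a : ℤ)) (some (b : ℤ))) "chouka") =
      decide (qP s.toList a ∧ rP s.toList b ∧ a + 10 ≤ b) := by
  rw [Bool.eq_iff_iff]
  have hsl : (PySem.Str.slice s (some (a : ℤ)) (some (b : ℤ))).toList
      = (s.toList.drop a).take (b - a) := by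
    rw [PySem.Str.toList_slice, PySem.Chars.slice_eq_listSlice, PySem.List.slice_natCast]
  rw [Bool.and_eq_true, PySem.Str.startswith_eq, PySem.Str.endswith_eq,
    PySem.Chars.startswith_iff, PySem.Chars.endswith_iff, hsl,
    show ("chak" : String).toList = chakL from rfl,
    show ("chouka" : String).toList = choukaL from rfl,
    decide_eq_true_iff]
  exact core s.toList a b hab hbn

lemma countP_range_sum (m : ℕ) (p : ℕ → Bool) :
    (((List.range m).countP p : ℕ) : ℤ) = ∑ k ∈ Finset.range m, if p k then 1 else 0 := by
  induction m with
  | zero => simp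
  | succ m ih =>
    rw [List.range_succ, List.countP_append, Finset.sum_range_succ, ← ih]
    by_cases h : p m <;> simp [h]

lemma A_eq (s : String) :
    count_delicious_substrings s =
      ∑ i ∈ Finset.range s.toList.length, ∑ j ∈ Finset.range (s.toList.length + 1),
        if qP s.toList i ∧ rP s.toList j ∧ i + 10 ≤ j then (1 : ℤ) else 0 := by
  show (PySem.List.pyRange 0 (PySem.Str.len s) 1).foldl (fun count i =>
    (PySem.List.pyRange (i + 1) (PySem.Str.len s + 1) 1).foldl (fun count j =>
      if (PySem.Str.startswith (PySem.Str.slice s (some i) (some j)) "chak" &&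
          PySem.Str.endswith (PySem.Str.slice s (some i) (some j)) "chouka") = true then
        count + 1
      else count) count) 0 = _
  rw [PySem.List.foldl_congr_mem (PySem.List.pyRange 0 (PySem.Str.len s) 1)
    (fun count i =>
      (PySem.List.pyRange (i + 1) (PySem.Str.len s + 1) 1).foldl (fun count j =>
        if (PySem.Str.startswith (PySem.Str.slice s (some i) (some j)) "chak" &&
            PySem.Str.endswith (PySem.Str.slice s (some i) (some j)) "chouka") = true then
          count + 1
        else count) count)
    (fun count i => count + (((PySem.List.pyRange (i + 1) (PySem.Str.len s + 1) 1).countP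
      (fun j => PySem.Str.startswith (PySem.Str.slice s (some i) (some j)) "chak" &&
        PySem.Str.endswith (PySem.Str.slice s (some i) (some j)) "chouka") : ℕ) : ℤ))
    0 (fun acc x _ => PySem.List.foldl_if_add_one _ _ _),
    PySem.List.foldl_add, zero_add, PySem.Str.len_eq,
    PySem.List.pyRange_zero_natCast, List.map_map]
  rw [show ∀ (f : ℕ → ℤ) (m : ℕ), ((List.range m).map f).sum = ∑ i ∈ Finset.range m, f i
      from fun f m => rfl]
  refine Finset.sum_congr rfl (fun i hi => ?_)
  simp only [Finset.mem_range] at hi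
  show (((PySem.List.pyRange ((i : ℤ) + 1) ((s.toList.length : ℤ) + 1) 1).countP
      (fun j => PySem.Str.startswith (PySem.Str.slice s (some (i : ℤ)) (some j)) "chak" &&
        PySem.Str.endswith (PySem.Str.slice s (some (i : ℤ)) (some j)) "chouka") : ℕ) : ℤ) = _
  rw [show ((i : ℤ) + 1) = ((i + 1 : ℕ) : ℤ) by push_cast; ring,
    show ((s.toList.length : ℤ) + 1) = ((s.toList.length + 1 : ℕ) : ℤ) by push_cast; ring,
    PySem.List.pyRange_one, List.countP_map,
    show (((s.toList.length + 1 : ℕ) : ℤ) - ((i + 1 : ℕ) : ℤ)).toNat = s.toList.length - i by omega,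
    countP_range_sum]
  have hterm : ∀ k ∈ Finset.range (s.toList.length - i),
      (if ((fun j => PySem.Str.startswith (PySem.Str.slice s (some (i : ℤ)) (some j)) "chak" &&
        PySem.Str.endswith (PySem.Str.slice s (some (i : ℤ)) (some j)) "chouka") ∘
          (fun k : ℕ => ((i + 1 : ℕ) : ℤ) + (k : ℤ))) k = true then (1 : ℤ) else 0)
      = (if qP s.toList i ∧ rP s.toList (i + 1 + k) ∧ i + 10 ≤ i + 1 + k then (1 : ℤ) else 0) := by
    intro k hk
    simp only [Finset.mem_range] at hk
    simp only [Function.comp_apply,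
      show ((i + 1 : ℕ) : ℤ) + (k : ℤ) = ((i + 1 + k : ℕ) : ℤ) by push_cast; ring,
      cond_eq s i (i + 1 + k) (by omega) (by omega), decide_eq_true_eq]
  rw [Finset.sum_congr rfl hterm,
    show s.toList.length - i = (s.toList.length + 1) - (i + 1) by omega,
    ← Finset.sum_Ico_eq_sum_range
      (fun j => if qP s.toList i ∧ rP s.toList j ∧ i + 10 ≤ j then (1 : ℤ) else 0) (i + 1)
      (s.toList.length + 1)]
  refine Finset.sum_subset (fun x hx => ?_) (fun x hx hx' => ?_)
  · simp only [Finset.mem_Ico, Finset.mem_range] at *; omega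
  · simp only [Finset.mem_Ico, Finset.mem_range, not_and, not_lt] at hx hx'
    simp only [ite_eq_right_iff]
    rintro ⟨-, -, h10⟩
    omega

-- ---- B's single pass ----

-- B's loop body (zeta-expanded; definitionally B's fold function)
def stepB (s : String) (st : ℤ × ℤ) (j : ℤ) : ℤ × ℤ :=
  (if 6 ≤ j ∧ PySem.Str.slice s (some (j - 6)) (some j) = "chouka"
     then st.1 + (if 10 ≤ j ∧ PySem.Str.slice s (some (j - 10)) (some (j - 6)) = "chak"
                    then st.2 + 1 else st.2)
     else st.1,
   if 10 ≤ j ∧ PySem.Str.slice s (some (j - 10)) (some (j - 6)) = "chak" then st.2 + 1 else st.2)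

lemma guard_chak (s : String) (k : ℕ) :
    (10 ≤ (k : ℤ) ∧ PySem.Str.slice s (some ((k : ℤ) - 10)) (some ((k : ℤ) - 6)) = "chak") ↔
      (10 ≤ k ∧ qP s.toList (k - 10)) := by
  by_cases h : 10 ≤ k
  · have h1 : ((k : ℤ) - 10) = ((k - 10 : ℕ) : ℤ) := by omega
    have h2 : ((k : ℤ) - 6) = ((k - 6 : ℕ) : ℤ) := by omega
    rw [h1, h2, ← String.toList_inj, PySem.Str.toList_slice, PySem.Chars.slice_eq_listSlice,
      PySem.List.slice_natCast, show (k - 6) - (k - 10) = 4 by omega,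
      show ("chak" : String).toList = chakL from rfl]
    constructor
    · rintro ⟨-, hq⟩; exact ⟨h, hq⟩
    · rintro ⟨-, hq⟩; exact ⟨by exact_mod_cast h, hq⟩
  · constructor
    · rintro ⟨h10, -⟩; exact absurd (by exact_mod_cast h10) h
    · rintro ⟨h10, -⟩; exact absurd h10 h
  
lemma guard_chouka (s : String) (k : ℕ) :
    (6 ≤ (k : ℤ) ∧ PySem.Str.slice s (some ((k : ℤ) - 6)) (some (k : ℤ)) = "chouka") ↔
      (6 ≤ k ∧ rP s.toList k) := by
  by_cases h : 6 ≤ k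
  · have h1 : ((k : ℤ) - 6) = ((k - 6 : ℕ) : ℤ) := by omega
    rw [h1, ← String.toList_inj, PySem.Str.toList_slice, PySem.Chars.slice_eq_listSlice,
      PySem.List.slice_natCast, show k - (k - 6) = 6 by omega,
      show ("chouka" : String).toList = choukaL from rfl]
    constructor
    · rintro ⟨-, hq⟩; exact ⟨h, hq⟩
    · rintro ⟨-, hq⟩; exact ⟨by exact_mod_cast h, hq⟩
  · constructor
    · rintro ⟨h6, -⟩; exact absurd (by exact_mod_cast h6) h
    · rintro ⟨h6, -⟩; exact absurd h6 h

lemma B_fold (s : String) (m : ℕ) :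
    (List.range m).foldl (fun st k => stepB s st ((k : ℕ) : ℤ)) ((0 : ℤ), (0 : ℤ))
      = (Tt s.toList m, Ck s.toList m) := by
  induction m with
  | zero => simp [Tt, Ck]
  | succ m ih =>
    rw [List.range_succ, List.foldl_append, ih]
    show stepB s (Tt s.toList m, Ck s.toList m) ((m : ℕ) : ℤ) = _
    rw [stepB]
    have hC : Ck s.toList (m + 1) =
        if 10 ≤ m ∧ qP s.toList (m - 10) then Ck s.toList m + 1 else Ck s.toList m := by
      rw [Ck, Finset.sum_range_succ, ← Ck]
      by_cases h : 10 ≤ m ∧ qP s.toList (m - 10)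
      · rw [if_pos h, if_pos h]
      · rw [if_neg h, if_neg h, add_zero]
    have hT : Tt s.toList (m + 1) =
        if 6 ≤ m ∧ rP s.toList m then Tt s.toList m + Ck s.toList (m + 1) else Tt s.toList m := by
      rw [Tt, Finset.sum_range_succ, ← Tt]
      by_cases h : 6 ≤ m ∧ rP s.toList m
      · rw [if_pos h, if_pos h]
      · rw [if_neg h, if_neg h, add_zero]
    simp only [if_congr (guard_chak s m) rfl rfl, if_congr (guard_chouka s m) rfl rfl]
    rw [hT, ← hC]

lemma B_eq (s : String) : count_delicious_substrings_alt s = Tt s.toList (s.toList.length + 1) := by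
  show ((PySem.List.pyRange 0 (PySem.Str.len s + 1) 1).foldl (stepB s) ((0 : ℤ), (0 : ℤ))).1 = _
  rw [PySem.Str.len_eq,
    show ((s.toList.length : ℤ) + 1) = ((s.toList.length + 1 : ℕ) : ℤ) by push_cast; ring,
    PySem.List.pyRange_zero_natCast, List.foldl_map, B_fold]

-- ===== VERDICT (by name: the statement is the Claim_ definition above) =====
theorem count_delicious_substrings_spec : Claim_equal_count_delicious_substrings := by
  intro s _
  unfold Spec_count_delicious_substrings
  rw [A_eq, B_eq, Finset.sum_comm, Tt]
  refine Finset.sum_congr rfl (fun j hj => ?_)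
  simp only [Finset.mem_range] at hj
  exact inner_eq s.toList j (by omega)
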